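-- pv_equiv track=rewrite | github.com/kendrick1win/KonTest_Code | debug.py | solve
-- ===== SOURCE A (Python) =====
-- def solve(N):
--     binary_sum = 0
--     while N > 0:
--         binary_sum += N % 2
--         N //= 2
--     result = ""
--     while binary_sum > 0:
--         result = str(binary_sum % 2) + result
--         binary_sum //= 2
--     return result if result else "0"
-- ===== SOURCE B (Python) =====
-- def solve(N):
--     count = 0
--     while N > 0:
--         N &= N - 1
--         count += 1
--     return bin(count)[2:]
-- ===== Notes on version B (the rewrite author's own statement) =====
-- stated objective: alternative
-- what changed: Counts set bits with Kernighan's N &= N-1 loop (one iteration per set bit instead of per bit position) and converts the count with bin() instead of a hand-rolled digit loop.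
import Mathlib
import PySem

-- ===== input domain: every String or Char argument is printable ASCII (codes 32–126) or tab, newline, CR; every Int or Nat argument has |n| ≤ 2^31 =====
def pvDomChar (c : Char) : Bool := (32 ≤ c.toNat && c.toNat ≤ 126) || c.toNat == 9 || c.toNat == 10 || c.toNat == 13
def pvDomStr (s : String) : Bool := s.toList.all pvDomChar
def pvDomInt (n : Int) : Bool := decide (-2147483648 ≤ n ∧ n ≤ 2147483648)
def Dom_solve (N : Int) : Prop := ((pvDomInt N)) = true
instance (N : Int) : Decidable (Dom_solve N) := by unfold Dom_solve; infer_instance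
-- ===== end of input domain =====

-- B counts set bits with Kernighan's `N &= N-1` loop (one step per set bit) and converts the
-- count with bin() instead of A's per-bit-position digit-sum loop; alternative decomposition,
-- identical return values on every input.

-- ===== PORT A =====
-- first while loop: binary_sum accumulates N % 2 while N //= 2
def solveLoop1 (n acc : Int) : Int :=
  if 0 < n then solveLoop1 (PySem.Int.floordiv n 2) (acc + PySem.Int.mod n 2) else acc
termination_by n.toNat
decreasing_by
  rename_i h
  rw [PySem.Int.floordiv_eq_ediv_of_pos (by omega)]
  omega

-- second while loop: result = str(binary_sum % 2) + result while binary_sum //= 2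
def solveLoop2 (b : Int) (res : String) : String :=
  if 0 < b then
    solveLoop2 (PySem.Int.floordiv b 2) (PySem.Int.toStr (PySem.Int.mod b 2) ++ res)
  else res
termination_by b.toNat
decreasing_by
  rename_i h
  rw [PySem.Int.floordiv_eq_ediv_of_pos (by omega)]
  omega

def solve (N : Int) : String :=
  let result := solveLoop2 (solveLoop1 N 0) ""
  if result ≠ "" then result else "0"

-- ===== PORT B =====
-- termination helper for the Kernighan loop (cited by name in decreasing_by)
theorem pvBandPredLt (n : Int) (h : 0 < n) :
    (PySem.Int.band n (n - 1)).toNat < n.toNat := by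
  obtain ⟨m, rfl⟩ : ∃ m : Nat, n = (m : Int) := ⟨n.toNat, by omega⟩
  have hm : m ≠ 0 := by omega
  have h1 : (m : Int) - 1 = ((m - 1 : Nat) : Int) := by omega
  rw [h1, PySem.Int.band_natCast]
  have := Nat.and_le_right (n := m) (m := m - 1)
  omega

-- while N > 0: N &= N - 1; count += 1
def altLoop (n count : Int) : Int :=
  if h : 0 < n then altLoop (PySem.Int.band n (n - 1)) (count + 1) else count
termination_by n.toNat
decreasing_by exact pvBandPredLt n h

-- port of bin(c)[2:] for c ≥ 0 (exact there: builtin binary digits, "0" for 0)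
def altBin (c : Int) : String :=
  if 0 < PySem.Int.floordiv c 2 then
    altBin (PySem.Int.floordiv c 2) ++ PySem.Int.toStr (PySem.Int.mod c 2)
  else PySem.Int.toStr (PySem.Int.mod c 2)
termination_by c.toNat
decreasing_by
  rename_i h
  rw [PySem.Int.floordiv_eq_ediv_of_pos (by omega)] at h ⊢
  omega

def solve_alt (N : Int) : String := altBin (altLoop N 0)

-- ===== PRECONDITION & SPEC =====
def Spec_solve (N : Int) (out : String) : Prop := out = solve_alt N
instance (N : Int) (out : String) : Decidable (Spec_solve N out) := by unfold Spec_solve; infer_instance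

-- ===== CLAIM (what is proved, stated in full; the proofs are below) =====
def Claim_equal_solve : Prop := ∀ (N : Int), Dom_solve N → Spec_solve N (solve N)

-- ===== LEMMAS AND PROOFS =====

-- proof-side Nat models of the two bit-count loops
def Spop (m : Nat) : Nat :=
  if m = 0 then 0 else m % 2 + Spop (m / 2)
termination_by m
decreasing_by omega

def Kpop (m : Nat) : Nat :=
  if m = 0 then 0 else 1 + Kpop (m &&& (m - 1))
termination_by m
decreasing_by rename_i h; have := Nat.and_le_right (n := m) (m := m - 1); omega

theorem land_pred_odd (q : Nat) : (2 * q + 1) &&& (2 * q) = 2 * q := by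
  apply Nat.eq_of_testBit_eq
  intro i
  cases i with
  | zero =>
      have h1 : (2 * q + 1) % 2 = 1 := by omega
      have h2 : (2 * q) % 2 = 0 := by omega
      simp [Nat.testBit_zero, h1, h2]
  | succ j =>
      rw [Nat.testBit_land, Nat.testBit_succ, Nat.testBit_succ]
      have h1 : (2 * q + 1) / 2 = q := by omega
      have h2 : (2 * q) / 2 = q := by omega
      rw [h1, h2, Bool.and_self]

theorem land_pred_even (q : Nat) (hq : 0 < q) :
    (2 * q) &&& (2 * q - 1) = 2 * (q &&& (q - 1)) := by
  apply Nat.eq_of_testBit_eq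
  intro i
  cases i with
  | zero =>
      have h1 : (2 * q) % 2 = 0 := by omega
      have h2 : (2 * (q &&& (q - 1))) % 2 = 0 := by omega
      simp [Nat.testBit_zero, h1, h2]
  | succ j =>
      rw [Nat.testBit_land, Nat.testBit_succ, Nat.testBit_succ, Nat.testBit_succ]
      have h1 : (2 * q) / 2 = q := by omega
      have h2 : (2 * q - 1) / 2 = q - 1 := by omega
      have h3 : (2 * (q &&& (q - 1))) / 2 = q &&& (q - 1) := by omega
      rw [h1, h2, h3, Nat.testBit_land]

theorem Spop_double (r : Nat) : Spop (2 * r) = Spop r := by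
  rcases Nat.eq_zero_or_pos r with h | h
  · subst h; rfl
  · rw [Spop]
    have h0 : ¬ (2 * r = 0) := by omega
    have h1 : (2 * r) % 2 = 0 := by omega
    have h2 : (2 * r) / 2 = r := by omega
    rw [if_neg h0, h1, h2]
    simp

theorem Spop_land (m : Nat) (hm : 0 < m) : Spop m = 1 + Spop (m &&& (m - 1)) := by
  induction m using Nat.strong_induction_on with
  | _ m ih =>
    rcases Nat.even_or_odd m with ⟨q, hq⟩ | ⟨q, hq⟩
    · -- even: m = 2q, q > 0
      have hq2 : m = 2 * q := by omega
      have hqpos : 0 < q := by omega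
      subst hq2
      have hland := land_pred_even q hqpos
      rw [hland, Spop_double, Spop_double]
      exact ih q (by omega) hqpos
    · -- odd: m = 2q + 1
      have hq2 : m = 2 * q + 1 := by omega
      subst hq2
      have hland : (2 * q + 1) &&& (2 * q + 1 - 1) = 2 * q := by
        have : 2 * q + 1 - 1 = 2 * q := by omega
        rw [this]; exact land_pred_odd q
      rw [hland, Spop_double]
      rw [Spop]
      have h0 : ¬ (2 * q + 1 = 0) := by omega
      have h1 : (2 * q + 1) % 2 = 1 := by omega
      have h2 : (2 * q + 1) / 2 = q := by omega
      simp [h1, h2]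

theorem Kpop_eq_Spop (m : Nat) : Kpop m = Spop m := by
  induction m using Nat.strong_induction_on with
  | _ m ih =>
    rcases Nat.eq_zero_or_pos m with h | h
    · subst h; rw [Kpop, Spop]; simp
    · have hlt : m &&& (m - 1) < m := by
        have := Nat.and_le_right (n := m) (m := m - 1); omega
      rw [Kpop, if_neg (by omega : ¬ m = 0), ih _ hlt, Spop_land m h]

theorem Spop_pos (m : Nat) (hm : 0 < m) : 0 < Spop m := by
  induction m using Nat.strong_induction_on with
  | _ m ih =>
    rw [Spop, if_neg (by omega : ¬ m = 0)]
    rcases Nat.even_or_odd m with ⟨q, hq⟩ | ⟨q, hq⟩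
    · have h1 : m % 2 = 0 := by omega
      have h2 : 0 < m / 2 := by omega
      have := ih (m / 2) (by omega) h2
      omega
    · omega

theorem solveLoop1_eq (m : Nat) : ∀ acc : Int, solveLoop1 (m : Int) acc = acc + (Spop m : Int) := by
  induction m using Nat.strong_induction_on with
  | _ m ih =>
    intro acc
    rcases Nat.eq_zero_or_pos m with h | h
    · subst h
      rw [solveLoop1, Spop]
      norm_num
    · rw [solveLoop1, if_pos (by exact_mod_cast h)]
      have hdiv : PySem.Int.floordiv (m : Int) 2 = ((m / 2 : Nat) : Int) := by
        exact_mod_cast PySem.Int.floordiv_natCast m 2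
      have hmod : PySem.Int.mod (m : Int) 2 = ((m % 2 : Nat) : Int) := by
        exact_mod_cast PySem.Int.mod_natCast m 2
      rw [hdiv, hmod, ih (m / 2) (by omega)]
      conv_rhs => rw [Spop]
      rw [if_neg (by omega : ¬ m = 0)]
      push_cast
      ring

theorem altLoop_eq (m : Nat) : ∀ c : Int, altLoop (m : Int) c = c + (Kpop m : Int) := by
  induction m using Nat.strong_induction_on with
  | _ m ih =>
    intro c
    rcases Nat.eq_zero_or_pos m with h | h
    · subst h
      rw [altLoop, Kpop]
      norm_num
    · rw [altLoop, dif_pos (by exact_mod_cast h)]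
      have h1 : (m : Int) - 1 = ((m - 1 : Nat) : Int) := by omega
      rw [h1, PySem.Int.band_natCast, ih _ (by have := Nat.and_le_right (n := m) (m := m - 1); omega)]
      conv_rhs => rw [Kpop]
      rw [if_neg (by omega : ¬ m = 0)]
      push_cast
      ring

theorem toStr_mod_two_len (m : Nat) :
    (PySem.Int.toStr (PySem.Int.mod (m : Int) 2)).length = 1 := by
  have hmod : PySem.Int.mod (m : Int) 2 = ((m % 2 : Nat) : Int) := by
    exact_mod_cast PySem.Int.mod_natCast m 2
  have h2 : m % 2 = 0 ∨ m % 2 = 1 := by omega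
  rcases h2 with h | h <;> rw [hmod, h] <;> decide

theorem altBin_len_pos (m : Nat) : 0 < (altBin (m : Int)).length := by
  rw [altBin]
  split
  · rw [String.length_append, toStr_mod_two_len]
    omega
  · rw [toStr_mod_two_len]
    omega

theorem altBin_ne_empty (m : Nat) : altBin (m : Int) ≠ "" := by
  intro hcon
  have hl := altBin_len_pos m
  rw [hcon] at hl
  simp at hl
theorem solveLoop2_eq (m : Nat) (hm : 0 < m) :
    ∀ res : String, solveLoop2 (m : Int) res = altBin (m : Int) ++ res := by
  induction m using Nat.strong_induction_on with
  | _ m ih =>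
    intro res
    rw [solveLoop2, if_pos (by exact_mod_cast hm)]
    have hdiv : PySem.Int.floordiv (m : Int) 2 = ((m / 2 : Nat) : Int) := by
      exact_mod_cast PySem.Int.floordiv_natCast m 2
    rw [altBin, hdiv]
    rcases Nat.lt_or_ge m 2 with h2 | h2
    · -- m = 1
      have hm1 : m = 1 := by omega
      subst hm1
      rw [if_neg (by decide), solveLoop2, if_neg (by decide)]
    · have hq : 0 < m / 2 := by omega
      rw [if_pos (by exact_mod_cast hq), ih (m / 2) (by omega) hq]
      rw [String.append_assoc]

-- ===== VERDICT (by name: the statement is the Claim_ definition above) =====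
theorem solve_spec : Claim_equal_solve := by
  intro N _
  unfold Spec_solve solve solve_alt
  rcases Int.lt_or_le 0 N with h | h
  · obtain ⟨m, rfl⟩ : ∃ m : Nat, N = (m : Int) := ⟨N.toNat, by omega⟩
    have hm : 0 < m := by omega
    rw [solveLoop1_eq, altLoop_eq, Kpop_eq_Spop]
    have hc : 0 < Spop m := Spop_pos m hm
    simp only [zero_add]
    rw [solveLoop2_eq (Spop m) hc ""]
    have hne : altBin ((Spop m : Nat) : Int) ++ "" ≠ "" := by
      rw [String.append_empty]; exact altBin_ne_empty _
    rw [if_pos hne, String.append_empty]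
  · have h1 : solveLoop1 N 0 = 0 := by rw [solveLoop1, if_neg (by omega)]
    have h2 : altLoop N 0 = 0 := by rw [altLoop, dif_neg (by omega)]
    rw [h1, h2]
    have h3 : solveLoop2 0 "" = "" := by rw [solveLoop2]; norm_num
    rw [h3, if_neg (by simp)]
    have hdiv : PySem.Int.floordiv (0 : Int) 2 = 0 := by
      exact_mod_cast PySem.Int.floordiv_natCast 0 2
    have hmod : PySem.Int.mod (0 : Int) 2 = 0 := by
      exact_mod_cast PySem.Int.mod_natCast 0 2
    rw [altBin, hdiv, if_neg (by omega), hmod]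
    decide
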